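-- pv_equiv track=rewrite | github.com/tkf/dictsdiff | src/dictsdiff/tests/test_cli.py | gen_file_paths
-- ===== SOURCE A (Python) =====
-- from itertools import combinations_with_replacement
--
-- def gen_file_paths(lengths):
--     def gen(length):
--         paths = list(map(str, range(length)))
--         for isjsp in combinations_with_replacement([False, True], length):
--             if any(x and y for x, y in zip(isjsp[:-1], isjsp[1:])):
--                 # Consecutive JSON_PATH is not allowed; skip it.
--                 continue
--
--             desired = [(p, '$.' + p if yes else None)
--                        for p, yes in zip(paths, isjsp)]
--
--             files = []
--             for p, yes in zip(paths, isjsp):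
--                 files.append(p)
--                 if yes:
--                     files.append('$.' + p)
--
--             yield files, desired
--
--     for l in lengths:
--         for example in gen(l):
--             yield example
-- ===== SOURCE B (Python) =====
-- def gen_file_paths(lengths):
--     # Closed form: the only boolean tuples surviving A's "no consecutive True"
--     # filter of combinations_with_replacement are all-False and (for length>=1)
--     # a single trailing True, in that order.
--     for length in lengths:
--         paths = [str(i) for i in range(length)]
--         yield list(paths), [(p, None) for p in paths]
--         if length >= 1:
--             last = paths[-1]
--             yield paths + ['$.' + last], \
--                 [(p, None) for p in paths[:-1]] + [(last, '$.' + last)]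
-- ===== Notes on version B (the rewrite author's own statement) =====
-- stated objective: simpler
-- what changed: B emits the two surviving examples per length (all-None, and for length>=1 the trailing '$.'-annotated one) directly in closed form instead of enumerating length+1 boolean combinations_with_replacement tuples and filtering out those with consecutive Trues.
import Mathlib
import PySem

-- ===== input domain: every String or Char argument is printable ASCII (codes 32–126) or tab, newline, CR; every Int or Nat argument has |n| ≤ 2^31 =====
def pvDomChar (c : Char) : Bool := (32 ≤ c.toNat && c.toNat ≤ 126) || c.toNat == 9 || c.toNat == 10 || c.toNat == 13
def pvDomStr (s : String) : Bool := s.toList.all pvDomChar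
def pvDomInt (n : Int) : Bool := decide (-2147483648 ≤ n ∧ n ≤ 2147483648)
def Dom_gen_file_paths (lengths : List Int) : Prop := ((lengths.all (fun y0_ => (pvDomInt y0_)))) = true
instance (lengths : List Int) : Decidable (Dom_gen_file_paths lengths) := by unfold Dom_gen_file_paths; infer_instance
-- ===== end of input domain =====

-- B replaces A's enumerate-and-filter over combinations_with_replacement by directly
-- emitting the two surviving examples per length (objective: simpler/faster).

-- ===== PORT A =====

-- hand port of itertools.combinations_with_replacement(pool, n) (lex order); exact for n ≥ 0
def pyCWR {α : Type} (pool : List α) (n : Nat) : List (List α) :=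
  match n, pool with
  | 0, _ => [[]]
  | _ + 1, [] => []
  | n + 1, x :: xs => (pyCWR (x :: xs) n).map (fun w => x :: w) ++ pyCWR xs (n + 1)
termination_by pool.length + n

-- any(x and y for x, y in zip(isjsp[:-1], isjsp[1:]))
def adjAny (l : List Bool) : Bool :=
  ((PySem.List.slice l none (some (-1))).zip (PySem.List.slice l (some 1) none)).any
    (fun xy => xy.1 && xy.2)

def buildDesired (paths : List String) (isjsp : List Bool) : List (String × Option String) :=
  (paths.zip isjsp).map (fun py => (py.1, if py.2 then some ("$." ++ py.1) else none))

def buildFiles (paths : List String) (isjsp : List Bool) : List String :=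
  (paths.zip isjsp).foldl
    (fun fs py =>
      let fs' := fs ++ [py.1]
      if py.2 then fs' ++ ["$." ++ py.1] else fs') []

-- inner generator gen(length); Python raises ValueError for negative length (excluded by Pre_)
def genA (length : Int) : List (List String × List (String × Option String)) :=
  let paths := (PySem.List.pyRange 0 length 1).map PySem.Int.toStr
  (pyCWR [false, true] length.toNat).foldl
    (fun acc isjsp =>
      if adjAny isjsp then acc
      else acc ++ [(buildFiles paths isjsp, buildDesired paths isjsp)]) []

def gen_file_paths (lengths : List Int) : List (List String × (List (String × Option String))) :=
  lengths.foldl (fun acc l => acc ++ genA l) []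

-- ===== PORT B =====

def genB (length : Int) : List (List String × List (String × Option String)) :=
  let paths := (PySem.List.pyRange 0 length 1).map PySem.Int.toStr
  (paths, paths.map (fun p => (p, (none : Option String)))) ::
    (if 1 ≤ length then
      let last := paths.getLastD ""   -- paths[-1]; paths is nonempty since length ≥ 1
      [(paths ++ ["$." ++ last],
        (PySem.List.slice paths none (some (-1))).map (fun p => (p, (none : Option String)))
          ++ [(last, some ("$." ++ last))])]
    else [])

def gen_file_paths_alt (lengths : List Int) : List (List String × (List (String × Option String))) :=
  lengths.flatMap genB

-- ===== PRECONDITION & SPEC =====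
-- Python A raises ValueError (combinations_with_replacement with negative r) on any negative length.
def Pre_gen_file_paths (lengths : List Int) : Prop := ∀ l ∈ lengths, 0 ≤ l
instance (lengths : List Int) : Decidable (Pre_gen_file_paths lengths) := by
  unfold Pre_gen_file_paths; infer_instance

def pvWitness_gen_file_paths : List Int := [0, 1, 2]

def Spec_gen_file_paths (lengths : List Int) (out : List (List String × (List (String × Option String)))) : Prop := out = gen_file_paths_alt lengths
instance (lengths : List Int) (out : List (List String × (List (String × Option String)))) : Decidable (Spec_gen_file_paths lengths out) := by unfold Spec_gen_file_paths; infer_instance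

-- ===== CLAIM (what is proved, stated in full; the proofs are below) =====
def Claim_equal_gen_file_paths : Prop := ∀ (lengths : List Int), Dom_gen_file_paths lengths → Pre_gen_file_paths lengths → Spec_gen_file_paths lengths (gen_file_paths lengths)

-- ===== LEMMAS AND PROOFS =====

theorem cwr_true (m : Nat) : pyCWR [true] m = [List.replicate m true] := by
  induction m with
  | zero => simp [pyCWR]
  | succ n ih => simp [pyCWR, ih, List.replicate_succ]

theorem cwr_FT_succ (n : Nat) :
    pyCWR [false, true] (n + 1) =
      (pyCWR [false, true] n).map (fun w => false :: w) ++ [List.replicate (n + 1) true] := by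
  simp [pyCWR, cwr_true]

theorem adjAny_eq (l : List Bool) :
    adjAny l = (l.dropLast.zip l.tail).any (fun xy => xy.1 && xy.2) := by
  simp [adjAny, PySem.List.slice_to_neg_one, PySem.List.slice_from_one]

theorem adjAny_cons_cons (a b : Bool) (t : List Bool) :
    adjAny (a :: b :: t) = ((a && b) || adjAny (b :: t)) := by
  simp [adjAny_eq]

theorem adjAny_false_cons (w : List Bool) : adjAny (false :: w) = adjAny w := by
  cases w with
  | nil => rfl
  | cons b t => simp [adjAny_cons_cons]

theorem foldKeep {X : Type} (g : List Bool → X) (L : List (List Bool)) (acc : List X) :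
    L.foldl (fun acc w => if adjAny w then acc else acc ++ [g w]) acc
      = acc ++ (L.filter (fun w => !adjAny w)).map g := by
  induction L generalizing acc with
  | nil => simp
  | cons w t ih =>
      cases h : adjAny w <;> simp [h, ih]

theorem filteredCWR (n : Nat) :
    (pyCWR [false, true] n).filter (fun w => !adjAny w)
      = List.replicate n false ::
          (if 1 ≤ n then [List.replicate (n - 1) false ++ [true]] else []) := by
  induction n with
  | zero => simp [pyCWR, adjAny_eq]
  | succ m ih =>
      rw [cwr_FT_succ, List.filter_append, List.filter_map]
      have hcomp : ((fun w => !adjAny w) ∘ (fun w => false :: w)) = fun w => !adjAny w := by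
        funext w; simp [adjAny_false_cons]
      rw [hcomp, ih]
      cases m with
      | zero => simp [adjAny_eq]
      | succ k =>
          simp [List.replicate_succ, adjAny_cons_cons]

theorem desired_allfalse (ps : List String) :
    buildDesired ps (List.replicate ps.length false) =
      ps.map (fun p => (p, (none : Option String))) := by
  induction ps with
  | nil => rfl
  | cons p t ih => simpa [buildDesired, List.replicate_succ] using ih

theorem buildFiles_step_eq :
    (fun (fs : List String) (py : String × Bool) =>
        let fs' := fs ++ [py.1]
        if py.2 then fs' ++ ["$." ++ py.1] else fs')
      = fun fs py => if py.2 then fs ++ [py.1, "$." ++ py.1] else fs ++ [py.1] := by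
  funext fs py; cases py.2 <;> simp

theorem files_allfalse_aux (ps : List String) (acc : List String) :
    (ps.zip (List.replicate ps.length false)).foldl
        (fun fs py => if py.2 then fs ++ [py.1, "$." ++ py.1] else fs ++ [py.1]) acc
      = acc ++ ps := by
  induction ps generalizing acc with
  | nil => simp
  | cons p t ih => simp [List.replicate_succ, ih]

theorem files_allfalse (ps : List String) :
    buildFiles ps (List.replicate ps.length false) = ps := by
  simpa [buildFiles, buildFiles_step_eq] using files_allfalse_aux ps []

theorem desired_trail (ps : List String) (h : ps ≠ []) :
    buildDesired ps (List.replicate (ps.length - 1) false ++ [true]) =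
      ps.dropLast.map (fun p => (p, (none : Option String)))
        ++ [(ps.getLastD "", some ("$." ++ ps.getLastD ""))] := by
  induction ps with
  | nil => exact absurd rfl h
  | cons p t ih =>
      cases t with
      | nil => rfl
      | cons q r =>
          have := ih (by simp)
          simp only [List.length_cons, Nat.add_sub_cancel] at this ⊢
          simp [buildDesired, List.replicate_succ] at this ⊢
          simpa [buildDesired] using this

theorem files_trail_aux (ps : List String) (h : ps ≠ []) (acc : List String) :
    (ps.zip (List.replicate (ps.length - 1) false ++ [true])).foldl
        (fun fs py => if py.2 then fs ++ [py.1, "$." ++ py.1] else fs ++ [py.1]) acc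
      = acc ++ ps ++ ["$." ++ ps.getLastD ""] := by
  induction ps generalizing acc with
  | nil => exact absurd rfl h
  | cons p t ih =>
      cases t with
      | nil => simp
      | cons q r =>
          have := ih (by simp) (acc ++ [p])
          simp only [List.length_cons, Nat.add_sub_cancel] at this ⊢
          simpa [List.replicate_succ] using this

theorem files_trail (ps : List String) (h : ps ≠ []) :
    buildFiles ps (List.replicate (ps.length - 1) false ++ [true]) =
      ps ++ ["$." ++ ps.getLastD ""] := by
  simpa [buildFiles] using files_trail_aux ps h []

theorem genA_eq_genB (l : Int) : genA l = genB l := by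
  unfold genA genB
  set ps := (PySem.List.pyRange 0 l 1).map PySem.Int.toStr with hps
  have hlen : ps.length = l.toNat := by
    simp [hps, PySem.List.length_pyRange_one]
  rw [foldKeep, filteredCWR, ← hlen]
  by_cases hl : 1 ≤ l
  · have h1 : 1 ≤ ps.length := by
      rw [hlen]; omega
    have hne : ps ≠ [] := List.ne_nil_of_length_pos (by omega)
    have hif : (1 ≤ l) = True := by simp [hl]
    have hifn : (1 ≤ ps.length) = True := by simp [h1]
    simp only [hif, hifn, if_true]
    simp [desired_allfalse, files_allfalse, desired_trail ps hne, files_trail ps hne,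
      PySem.List.slice_to_neg_one]
  · have h0 : ps.length = 0 := by
      rw [hlen]; omega
    have : ps = [] := List.eq_nil_of_length_eq_zero h0
    simp [this, hl, buildDesired, buildFiles]

-- ===== VERDICT (by name: the statement is the Claim_ definition above) =====
theorem gen_file_paths_spec : Claim_equal_gen_file_paths := by
  intro lengths _ _
  unfold Spec_gen_file_paths gen_file_paths gen_file_paths_alt
  rw [PySem.List.foldl_append_eq_flatMap]
  rw [show genA = genB from funext genA_eq_genB]
  simp
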